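-- pv_equiv track=rewrite | github.com/tarsioonofrio/codility-challenge | task2/test2.py | solution_codility
-- ===== SOURCE A (Python) =====
-- from collections import deque, OrderedDict
--
-- def solution_codility(N):
--     s = deque()
--     for p in range(30):
--         for q in range(30):
--             n = (2 ** p) * (3 ** q)
--             s.append(n)
--     s = list(s)
--     s.sort()
--
--     return s[N]
-- ===== SOURCE B (Python) =====
-- def solution_codility(N):
--     def merge(a, b):
--         out = []
--         i = j = 0
--         while i < len(a) and j < len(b):
--             if a[i] <= b[j]:
--                 out.append(a[i])
--                 i += 1
--             else:
--                 out.append(b[j])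
--                 j += 1
--         out.extend(a[i:])
--         out.extend(b[j:])
--         return out
--
--     s = []
--     for q in range(30):
--         s = merge(s, [(3 ** q) * (2 ** p) for p in range(30)])
--     return s[N]
-- ===== Notes on version B (the rewrite author's own statement) =====
-- stated objective: alternative
-- what changed: B replaces generate-all-products-then-sort with building the ordered list directly: it two-pointer-merges the thirty already-sorted geometric rows (fixed power of three times ascending powers of two) one by one, so no sort call remains.
import Mathlib
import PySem

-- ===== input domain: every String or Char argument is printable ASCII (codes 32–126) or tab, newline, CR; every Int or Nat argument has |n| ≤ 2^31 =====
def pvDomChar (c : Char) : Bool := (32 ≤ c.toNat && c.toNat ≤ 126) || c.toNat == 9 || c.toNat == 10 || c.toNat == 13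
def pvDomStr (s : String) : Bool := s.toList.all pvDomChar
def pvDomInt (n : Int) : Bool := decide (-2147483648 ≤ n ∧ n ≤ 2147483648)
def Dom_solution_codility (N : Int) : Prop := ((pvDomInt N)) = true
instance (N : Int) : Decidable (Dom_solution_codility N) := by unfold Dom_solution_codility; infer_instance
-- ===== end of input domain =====

-- B builds the ordered list by merging the 30 sorted geometric rows instead of sorting all 900 products; alternative decomposition, same cost class.

-- ===== PORT A =====
-- the list s after the two nested loops (p, q from range(30) are nonneg, so .toNat on the exponent is exact)
def aRaw : List Int :=
  (PySem.List.pyRange 0 30 1).foldl (fun s p =>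
    (PySem.List.pyRange 0 30 1).foldl (fun s q => s ++ [2 ^ p.toNat * 3 ^ q.toNat]) s) []

-- s.sort() — Python's in-place stable sort
def aSorted : List Int := PySem.List.sorted aRaw (fun x => x) false

-- s[N]; Pre_ below guarantees the index is in range (Python raises IndexError otherwise)
def solution_codility (N : Int) : Int := (PySem.List.pyGet? aSorted N).getD 0

-- ===== PORT B =====
-- Source B's two-pointer merge of two lists; the fuel argument (total remaining length) only makes
-- the alternating recursion structural — it never runs out before one side is exhausted.
def bMergeGo : Nat → List Int → List Int → List Int
  | 0, a, b => a ++ b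
  | _ + 1, [], b => b
  | _ + 1, a, [] => a
  | n + 1, x :: xs, y :: ys =>
    if x ≤ y then x :: bMergeGo n xs (y :: ys) else y :: bMergeGo n (x :: xs) ys

def bMerge (a b : List Int) : List Int := bMergeGo (a.length + b.length) a b

-- s after the loop over q: fold merging each row [(3**q)*(2**p) for p in range(30)]
def bList : List Int :=
  (PySem.List.pyRange 0 30 1).foldl (fun s q =>
    bMerge s ((PySem.List.pyRange 0 30 1).map (fun p => 3 ^ q.toNat * 2 ^ p.toNat))) []

def solution_codility_alt (N : Int) : Int := (PySem.List.pyGet? bList N).getD 0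

-- ===== PRECONDITION & SPEC =====
-- Pre_ excludes exactly the indices on which Python's s[N] raises IndexError (len(s) = 900).
def Pre_solution_codility (N : Int) : Prop := -900 ≤ N ∧ N < 900
instance (N : Int) : Decidable (Pre_solution_codility N) := by unfold Pre_solution_codility; infer_instance
def pvWitness_solution_codility : Int := (0)

def Spec_solution_codility (N : Int) (out : Int) : Prop := out = solution_codility_alt N
instance (N : Int) (out : Int) : Decidable (Spec_solution_codility N out) := by unfold Spec_solution_codility; infer_instance

-- ===== CLAIM (what is proved, stated in full; the proofs are below) =====
def Claim_equal_solution_codility : Prop := ∀ (N : Int), Dom_solution_codility N → Pre_solution_codility N → Spec_solution_codility N (solution_codility N)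

-- ===== LEMMAS AND PROOFS =====
-- B's merge-built list is strictly increasing (899 kernel comparisons)
set_option maxRecDepth 100000 in
set_option maxHeartbeats 1000000 in
theorem bList_chain : List.IsChain (· < ·) bList := by decide

-- B's list is a permutation of A's raw product list
set_option maxRecDepth 100000 in
set_option maxHeartbeats 4000000 in
theorem bList_perm : bList.Perm aRaw := by decide

-- hence B's list IS the sorted form of A's list (strictly increasing rearrangement names the sort)
theorem bList_pairwise : List.Pairwise (· < ·) bList :=
  List.isChain_iff_pairwise.mp bList_chain

-- hence B's list IS the sorted form of A's list (strictly increasing rearrangement names the sort)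
theorem aSorted_eq_bList : aSorted = bList :=
  PySem.List.sorted_eq_of_perm_of_pairwise_lt aRaw bList (fun x => x) bList_perm bList_pairwise

-- ===== VERDICT (by name: the statement is the Claim_ definition above) =====
theorem solution_codility_spec : Claim_equal_solution_codility := by
  intro N _ _
  unfold Spec_solution_codility solution_codility solution_codility_alt
  rw [aSorted_eq_bList]
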